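-- pv_equiv track=rewrite | github.com/revjkee/aethernova | core-systems/datafabric-core/datafabric/processing/transforms/watermarking.py | _highband_mask
-- ===== SOURCE A (Python) =====
-- def _highband_mask(N: int) -> list[tuple[int, int]]:
--     coords: list[tuple[int, int]] = []
--     thresh = (2 * N) // 3
--     for u in range(N):
--         for v in range(N):
--             if u + v >= thresh:
--                 coords.append((u, v))
--     return coords
-- ===== SOURCE B (Python) =====
-- def _highband_mask(N: int) -> list[tuple[int, int]]:
--     # Enumerate the qualifying cells anti-diagonal by anti-diagonal (constant
--     # sum s = u + v >= thresh), then sort once to obtain row-major order.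
--     thresh = (2 * N) // 3
--     pairs: list[tuple[int, int]] = []
--     for s in range(thresh, 2 * N - 1):
--         for u in range(max(0, s - (N - 1)), min(N - 1, s) + 1):
--             pairs.append((u, s - u))
--     return sorted(pairs)
-- ===== Notes on version B (the rewrite author's own statement) =====
-- stated objective: alternative
-- what changed: B enumerates the qualifying cells anti-diagonal by anti-diagonal (constant sum s = u+v running from thresh to 2N-2, with the valid u-interval of each diagonal computed arithmetically) and then sorts the collected pairs once to recover row-major order, instead of A's row-by-row scan of the full grid with a per-cell filter.
import Mathlib
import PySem

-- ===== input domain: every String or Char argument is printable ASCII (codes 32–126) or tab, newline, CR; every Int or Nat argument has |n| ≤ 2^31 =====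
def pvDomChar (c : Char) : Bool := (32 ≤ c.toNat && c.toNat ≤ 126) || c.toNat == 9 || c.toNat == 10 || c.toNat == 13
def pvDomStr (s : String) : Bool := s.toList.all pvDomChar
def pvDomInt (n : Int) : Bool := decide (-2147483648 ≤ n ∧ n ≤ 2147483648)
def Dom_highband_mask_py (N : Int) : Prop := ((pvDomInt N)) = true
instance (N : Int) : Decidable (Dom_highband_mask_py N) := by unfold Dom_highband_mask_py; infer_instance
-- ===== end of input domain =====

-- B enumerates the qualifying cells anti-diagonal by anti-diagonal (constant sum s = u+v)
-- and then sorts once to recover row-major order, instead of A's filtered full-grid scan (alternative algorithm).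

-- ===== PORT A =====
def highband_mask_py (N : Int) : List (Int × Int) :=
  let thresh := PySem.Int.floordiv (2 * N) 3
  (PySem.List.pyRange 0 N 1).foldl (fun coords u =>
    (PySem.List.pyRange 0 N 1).foldl (fun coords v =>
      if thresh ≤ u + v then coords ++ [(u, v)] else coords) coords) []

-- ===== PORT B =====
def highband_mask_py_alt (N : Int) : List (Int × Int) :=
  let thresh := PySem.Int.floordiv (2 * N) 3
  let pairs := (PySem.List.pyRange thresh (2 * N - 1) 1).foldl (fun pairs s =>
    (PySem.List.pyRange (max 0 (s - (N - 1))) (min (N - 1) s + 1) 1).foldl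
      (fun pairs u => pairs ++ [(u, s - u)]) pairs) []
  PySem.List.sorted2 pairs Prod.fst Prod.snd

-- ===== PRECONDITION & SPEC =====
def Spec_highband_mask_py (N : Int) (out : List (Int × Int)) : Prop := out = highband_mask_py_alt N
instance (N : Int) (out : List (Int × Int)) : Decidable (Spec_highband_mask_py N out) := by unfold Spec_highband_mask_py; infer_instance

-- ===== CLAIM (what is proved, stated in full; the proofs are below) =====
def Claim_equal_highband_mask_py : Prop := ∀ (N : Int), Dom_highband_mask_py N → Spec_highband_mask_py N (highband_mask_py N)

-- ===== LEMMAS AND PROOFS =====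

-- Row-major (lexicographic) non-strict and strict orders on pairs.
def pvLexLe (a b : Int × Int) : Prop := a.1 < b.1 ∨ (a.1 = b.1 ∧ a.2 ≤ b.2)
def pvLexLt (a b : Int × Int) : Prop := a.1 < b.1 ∨ (a.1 = b.1 ∧ a.2 < b.2)

-- The comparison sorted2 … Prod.fst Prod.snd uses.
def pvBefore (a b : Int × Int) : Bool :=
  decide (a.1 < b.1) || (!decide (b.1 < a.1) && decide (a.2 < b.2))

-- A-side flattened list: each row's qualifying suffix, row by row.
def pvRowList (N t : Int) : List (Int × Int) :=
  (PySem.List.pyRange 0 N 1).flatMap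
    (fun u => (PySem.List.pyRange (max 0 (t - u)) N 1).map (fun v => (u, v)))

-- B-side flattened list: each anti-diagonal's cells, diagonal by diagonal.
def pvDiagList (N t : Int) : List (Int × Int) :=
  (PySem.List.pyRange t (2 * N - 1) 1).flatMap
    (fun s => (PySem.List.pyRange (max 0 (s - (N - 1))) (min (N - 1) s + 1) 1).map
      (fun u => (u, s - u)))

theorem pvLexLe_trans {a b c : Int × Int} (h1 : pvLexLe a b) (h2 : pvLexLe b c) : pvLexLe a c := by
  unfold pvLexLe at *; omega

theorem pvLexLe_antisymm {a b : Int × Int} (h1 : pvLexLe a b) (h2 : pvLexLe b a) : a = b := by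
  obtain ⟨x, y⟩ := a; obtain ⟨z, w⟩ := b
  unfold pvLexLe at *; simp_all; omega

theorem pvBefore_true {a b : Int × Int} (h : pvBefore a b = true) : pvLexLe a b := by
  unfold pvBefore at h; unfold pvLexLe; simp at h; omega

theorem pvBefore_false {a b : Int × Int} (h : pvBefore a b = false) : pvLexLe b a := by
  unfold pvBefore at h; unfold pvLexLe; simp at h; omega

-- Inserting into a lexicographically ordered list keeps it ordered.
theorem pvInsertBy_pairwise (x : Int × Int) (ys : List (Int × Int))
    (h : ys.Pairwise pvLexLe) :
    (PySem.List.insertBy pvBefore x ys).Pairwise pvLexLe := by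
  induction ys with
  | nil => simp [PySem.List.insertBy]
  | cons y ys ih =>
    rw [List.pairwise_cons] at h
    by_cases hb : pvBefore x y = true
    · rw [show PySem.List.insertBy pvBefore x (y :: ys) = x :: y :: ys by
        simp [PySem.List.insertBy, hb]]
      refine List.pairwise_cons.mpr ⟨?_, List.pairwise_cons.mpr ⟨h.1, h.2⟩⟩
      intro z hz
      rcases List.mem_cons.mp hz with rfl | hz'
      · exact pvBefore_true hb
      · exact pvLexLe_trans (pvBefore_true hb) (h.1 z hz')
    · rw [show PySem.List.insertBy pvBefore x (y :: ys)
            = y :: PySem.List.insertBy pvBefore x ys by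
        simp [PySem.List.insertBy, hb]]
      refine List.pairwise_cons.mpr ⟨?_, ih h.2⟩
      intro z hz
      have hz' : z = x ∨ z ∈ ys := (PySem.List.insertBy_mem_iff pvBefore x z ys).mp hz
      rcases hz' with rfl | hz'
      · exact pvBefore_false (by simpa using hb)
      · exact h.1 z hz'

theorem pvFold_pairwise (xs : List (Int × Int)) :
    ∀ acc : List (Int × Int), acc.Pairwise pvLexLe →
    (xs.foldl (fun acc x => PySem.List.insertBy pvBefore x acc) acc).Pairwise pvLexLe := by
  induction xs with
  | nil => intro acc h; simpa using h
  | cons x xs ih =>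
    intro acc h
    exact ih _ (pvInsertBy_pairwise x acc h)

theorem pvSorted2_eq_fold (xs : List (Int × Int)) :
    PySem.List.sorted2 xs Prod.fst Prod.snd
      = xs.foldl (fun acc x => PySem.List.insertBy pvBefore x acc) [] := rfl

theorem pvSorted2_pairwise (xs : List (Int × Int)) :
    (PySem.List.sorted2 xs Prod.fst Prod.snd).Pairwise pvLexLe := by
  rw [pvSorted2_eq_fold]
  exact pvFold_pairwise xs [] (by simp)

-- A's inner filtering loop over row u equals the row's contiguous qualifying suffix.
theorem pv_inner (n : Nat) : ∀ (a b t u : Int) (acc : List (Int × Int)), (b - a).toNat = n →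
    (PySem.List.pyRange a b 1).foldl
      (fun c v => if t ≤ u + v then c ++ [(u, v)] else c) acc
      = acc ++ (PySem.List.pyRange (max a (t - u)) b 1).map (fun v => (u, v)) := by
  induction n with
  | zero =>
    intro a b t u acc h
    have hba : b ≤ a := by omega
    rw [PySem.List.pyRange_one_eq_nil hba, PySem.List.pyRange_one_eq_nil (by omega : b ≤ max a (t - u))]
    simp
  | succ n ih =>
    intro a b t u acc h
    have hab : a < b := by omega
    rw [PySem.List.pyRange_one_cons hab]
    simp only [List.foldl_cons]
    by_cases hk : t ≤ u + a
    · rw [if_pos hk, ih (a + 1) b t u _ (by omega)]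
      have h1 : max a (t - u) = a := by omega
      have h2 : max (a + 1) (t - u) = a + 1 := by omega
      rw [h1, h2, PySem.List.pyRange_one_cons hab]
      simp
    · rw [if_neg hk, ih (a + 1) b t u _ (by omega)]
      have h1 : max a (t - u) = t - u := by omega
      have h2 : max (a + 1) (t - u) = t - u := by omega
      rw [h1, h2]

theorem pvA_eq (N : Int) :
    highband_mask_py N = pvRowList N (PySem.Int.floordiv (2 * N) 3) := by
  unfold highband_mask_py pvRowList
  dsimp only
  rw [show (PySem.List.pyRange 0 N 1).foldl (fun coords u =>
      (PySem.List.pyRange 0 N 1).foldl (fun coords v =>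
        if PySem.Int.floordiv (2 * N) 3 ≤ u + v then coords ++ [(u, v)] else coords) coords) []
    = (PySem.List.pyRange 0 N 1).foldl (fun coords u =>
      coords ++ (PySem.List.pyRange (max 0 (PySem.Int.floordiv (2 * N) 3 - u)) N 1).map
        (fun v => (u, v))) [] from
    PySem.List.foldl_congr_mem _ _ _ _ (fun acc u _ => by
      simpa using pv_inner (N - 0).toNat 0 N (PySem.Int.floordiv (2 * N) 3) u acc (by omega))]
  rw [PySem.List.foldl_append_eq_flatMap]
  simp

theorem pvB_eq (N : Int) :
    highband_mask_py_alt N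
      = PySem.List.sorted2 (pvDiagList N (PySem.Int.floordiv (2 * N) 3)) Prod.fst Prod.snd := by
  unfold highband_mask_py_alt pvDiagList
  dsimp only
  congr 1
  rw [show ∀ L : List Int, L.foldl (fun pairs s =>
      (PySem.List.pyRange (max 0 (s - (N - 1))) (min (N - 1) s + 1) 1).foldl
        (fun pairs u => pairs ++ [(u, s - u)]) pairs) []
    = L.foldl (fun pairs s =>
      pairs ++ (PySem.List.pyRange (max 0 (s - (N - 1))) (min (N - 1) s + 1) 1).map
        (fun u => (u, s - u))) [] from fun L =>
    PySem.List.foldl_congr_mem _ _ _ _ (fun acc s _ => by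
      rw [PySem.List.foldl_append_eq_flatMap, Eq.symm List.map_eq_flatMap])]
  rw [PySem.List.foldl_append_eq_flatMap]
  simp

-- Membership: both flattened lists hold exactly the grid cells with u+v ≥ t.
theorem pvMemRow (N t : Int) (p : Int × Int) :
    p ∈ pvRowList N t ↔ 0 ≤ p.1 ∧ p.1 < N ∧ 0 ≤ p.2 ∧ p.2 < N ∧ t ≤ p.1 + p.2 := by
  obtain ⟨x, y⟩ := p
  unfold pvRowList
  simp only [List.mem_flatMap, List.mem_map, PySem.List.mem_pyRange_one, Prod.mk.injEq]
  constructor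
  · rintro ⟨u, hu, v, hv, rfl, rfl⟩; omega
  · rintro ⟨h1, h2, h3, h4, h5⟩
    exact ⟨x, by omega, y, by omega, rfl, rfl⟩

theorem pvMemDiag (N t : Int) (p : Int × Int) :
    p ∈ pvDiagList N t ↔ 0 ≤ p.1 ∧ p.1 < N ∧ 0 ≤ p.2 ∧ p.2 < N ∧ t ≤ p.1 + p.2 := by
  obtain ⟨x, y⟩ := p
  unfold pvDiagList
  simp only [List.mem_flatMap, List.mem_map, PySem.List.mem_pyRange_one, Prod.mk.injEq]
  constructor
  · rintro ⟨s, hs, u, hu, rfl, rfl⟩; omega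
  · rintro ⟨h1, h2, h3, h4, h5⟩
    exact ⟨x + y, by omega, x, by omega, rfl, by omega⟩

-- The row list is strictly increasing in row-major order.
theorem pvRow_pairwise_lt (N t : Int) : (pvRowList N t).Pairwise pvLexLt := by
  unfold pvRowList
  rw [List.pairwise_flatMap]
  constructor
  · intro u _
    rw [List.pairwise_map]
    exact (PySem.List.pairwise_lt_pyRange_one _ _).imp (fun h => Or.inr ⟨rfl, h⟩)
  · refine (PySem.List.pairwise_lt_pyRange_one _ _).imp ?_
    intro u1 u2 h x hx y hy
    simp only [List.mem_map] at hx hy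
    obtain ⟨v1, _, rfl⟩ := hx
    obtain ⟨v2, _, rfl⟩ := hy
    exact Or.inl h

theorem pvRow_pairwise_le (N t : Int) : (pvRowList N t).Pairwise pvLexLe :=
  (pvRow_pairwise_lt N t).imp (fun h => by unfold pvLexLt pvLexLe at *; omega)

theorem pvRow_nodup (N t : Int) : (pvRowList N t).Nodup :=
  (pvRow_pairwise_lt N t).imp (fun h => by
    intro he; rw [he] at h; unfold pvLexLt at h; omega)

theorem pvDiag_nodup (N t : Int) : (pvDiagList N t).Nodup := by
  unfold pvDiagList
  rw [List.nodup_flatMap]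
  constructor
  · intro s _
    refine (PySem.List.nodup_pyRange_one _ _).map ?_
    intro a b hab
    simpa using congrArg Prod.fst hab
  · refine (PySem.List.pairwise_lt_pyRange_one _ _).imp ?_
    intro s1 s2 h
    unfold Function.onFun
    rw [List.disjoint_right]
    intro p hp2 hp1
    simp only [List.mem_map, PySem.List.mem_pyRange_one] at hp1 hp2
    obtain ⟨u1, _, rfl⟩ := hp1
    obtain ⟨u2, _, h2⟩ := hp2
    have := congrArg Prod.fst h2
    have := congrArg Prod.snd h2
    simp_all

-- ===== VERDICT (by name: the statement is the Claim_ definition above) =====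
theorem highband_mask_py_spec : Claim_equal_highband_mask_py := by
  intro N _
  show highband_mask_py N = highband_mask_py_alt N
  rw [pvA_eq, pvB_eq]
  set t := PySem.Int.floordiv (2 * N) 3 with ht
  have hperm : (pvRowList N t).Perm (PySem.List.sorted2 (pvDiagList N t) Prod.fst Prod.snd) := by
    refine ((List.perm_ext_iff_of_nodup (pvRow_nodup N t) ?_).mpr ?_)
    · exact ((PySem.List.sorted2_perm _ _ _ _).nodup_iff).mpr (pvDiag_nodup N t)
    · intro p
      rw [pvMemRow, (PySem.List.sorted2_perm _ _ _ _).mem_iff, pvMemDiag]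
  exact List.Perm.eq_of_pairwise
    (fun a b _ _ h1 h2 => pvLexLe_antisymm h1 h2)
    (pvRow_pairwise_le N t) (pvSorted2_pairwise _) hperm
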